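-- pv_equiv track=rewrite | github.com/erget/peak_parameterizer | peak_parameters.py | parse_error_values
-- ===== SOURCE A (Python) =====
-- def parse_error_values(flags):
--     '''
--     Parses flag dictionary from GRASS parser into text descriptions
--     @return error_values: A list of error values
--     '''
--     # Append error flags to error values list
--     error_values = []
--     for error_flag in flags.keys():
--         if flags[error_flag]:
--             error_values.append(error_flag) # Replace error values from flags with readable strings
--
--     if 't' in error_values:
--         error_values.remove('t')
--         error_values.append('true positives')
--     if 'f' in error_values:
--         error_values.remove('f')
--         error_values.append('false positives')
--     if 'n' in error_values:
--         error_values.remove('n')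
--         error_values.append('false negatives')
--     if 's' in error_values:
--         error_values.remove('s')
--         error_values.append('summarize')
--     return error_values
-- ===== SOURCE B (Python) =====
-- SPECIAL = {'t': 'true positives', 'f': 'false positives',
--            'n': 'false negatives', 's': 'summarize'}
--
-- def parse_error_values(flags):
--     '''
--     Parses flag dictionary from GRASS parser into text descriptions
--     @return error_values: A list of error values
--     '''
--     error_values = [key for key, value in flags.items()
--                     if value and key not in SPECIAL]
--     for key, text in SPECIAL.items():
--         if flags.get(key):
--             error_values.append(text)
--     return error_values
-- ===== Notes on version B (the rewrite author's own statement) =====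
-- stated objective: simpler
-- what changed: Instead of collecting all truthy flags and then mutating the list with four membership-test/remove/append passes, B builds the non-special truthy keys in one comprehension and appends the fixed-order readable strings for the four special flags directly from the dict, with no list mutation.
import Mathlib
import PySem

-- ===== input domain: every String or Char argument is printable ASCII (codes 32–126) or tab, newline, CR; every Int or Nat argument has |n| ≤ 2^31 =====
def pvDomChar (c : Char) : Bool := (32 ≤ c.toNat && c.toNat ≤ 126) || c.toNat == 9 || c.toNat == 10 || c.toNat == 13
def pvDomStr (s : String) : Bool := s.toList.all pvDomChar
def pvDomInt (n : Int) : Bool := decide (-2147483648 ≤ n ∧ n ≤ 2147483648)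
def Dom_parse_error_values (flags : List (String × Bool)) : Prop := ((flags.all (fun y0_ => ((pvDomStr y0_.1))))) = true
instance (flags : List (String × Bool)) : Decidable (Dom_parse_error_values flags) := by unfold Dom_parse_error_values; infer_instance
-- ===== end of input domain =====

-- B replaces A's four membership-test/remove/append mutation passes over the result list by one
-- comprehension over the dict plus a fixed-order pass over the four special flags (simpler, no mutation).

-- ===== PORT A =====
-- The dict parameter is an association list; PySem.Dict.ofList gives the dict's (unique, insertion-ordered,
-- last-write-wins) view.  'error_values.remove(x)' under the 'x in error_values' guard removes the first
-- occurrence, which is exactly List.erase there.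
def parse_error_values (flags : List (String × Bool)) : List String :=
  let d := PySem.Dict.ofList flags
  let ev0 := d.keys.foldl (fun acc k => if d.getD k false then acc ++ [k] else acc) []
  let ev1 := if ev0.contains "t" then ev0.erase "t" ++ ["true positives"] else ev0
  let ev2 := if ev1.contains "f" then ev1.erase "f" ++ ["false positives"] else ev1
  let ev3 := if ev2.contains "n" then ev2.erase "n" ++ ["false negatives"] else ev2
  if ev3.contains "s" then ev3.erase "s" ++ ["summarize"] else ev3

-- ===== PORT B =====
-- the module-level SPECIAL dict of Source B
def pvSpecial : PySem.Dict String String :=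
  PySem.Dict.ofList [("t", "true positives"), ("f", "false positives"),
                     ("n", "false negatives"), ("s", "summarize")]

def parse_error_values_alt (flags : List (String × Bool)) : List String :=
  let d := PySem.Dict.ofList flags
  -- [key for key, value in flags.items() if value and key not in SPECIAL]
  let ev := (d.items.filter (fun p => p.2 && !(pvSpecial.contains p.1))).map (·.1)
  -- for key, text in SPECIAL.items(): if flags.get(key): error_values.append(text)
  pvSpecial.items.foldl (fun acc m => if d.getD m.1 false then acc ++ [m.2] else acc) ev

-- ===== PRECONDITION & SPEC =====
def Spec_parse_error_values (flags : List (String × Bool)) (out : List String) : Prop := out = parse_error_values_alt flags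
instance (flags : List (String × Bool)) (out : List String) : Decidable (Spec_parse_error_values flags out) := by unfold Spec_parse_error_values; infer_instance

-- ===== CLAIM (what is proved, stated in full; the proofs are below) =====
def Claim_equal_parse_error_values : Prop := ∀ (flags : List (String × Bool)), Dom_parse_error_values flags → Spec_parse_error_values flags (parse_error_values flags)

-- ===== LEMMAS AND PROOFS =====

theorem pvSpecial_items : pvSpecial.items =
    [("t", "true positives"), ("f", "false positives"),
     ("n", "false negatives"), ("s", "summarize")] := by
  rfl

theorem pvSpecial_contains (k : String) :
    pvSpecial.contains k = (k == "t" || k == "f" || k == "n" || k == "s") := by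
  rw [PySem.Dict.contains_eq_decide_mem_keys, Bool.eq_iff_iff]
  simp only [PySem.Dict.keys, pvSpecial_items, List.map_cons, List.map_nil, List.mem_cons,
    List.not_mem_nil, or_false, decide_eq_true_eq, Bool.or_eq_true, beq_iff_eq]
  tauto

-- A's four erases on any nodup list are one filter
theorem pv_erase4 (ev : List String) (hnd : ev.Nodup) :
    (((ev.erase "t").erase "f").erase "n").erase "s"
      = ev.filter (fun k => !(pvSpecial.contains k)) := by
  rw [List.Nodup.erase_eq_filter hnd, List.Nodup.erase_eq_filter (hnd.filter _),
      List.Nodup.erase_eq_filter ((hnd.filter _).filter _),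
      List.Nodup.erase_eq_filter (((hnd.filter _).filter _).filter _),
      List.filter_filter, List.filter_filter, List.filter_filter]
  apply List.filter_congr
  intro k _
  by_cases h1 : k = "t" <;> by_cases h2 : k = "f" <;> by_cases h3 : k = "n" <;>
    by_cases h4 : k = "s" <;>
    · rw [Bool.eq_iff_iff]
      simp [h1, h2, h3, h4, pvSpecial_contains]

-- one A-step: test/remove/append on 'front ++ already-appended tail'
theorem pv_step (s txt : String) (front tail l : List String)
    (hs : s ∉ tail) (hl : l = front ++ tail) :
    (if l.contains s then l.erase s ++ [txt] else l)
      = front.erase s ++ (tail ++ (if s ∈ front then [txt] else [])) := by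
  subst hl
  by_cases h : s ∈ front
  · simp [List.contains_eq_mem, h, List.erase_append_left _ h]
  · simp [List.contains_eq_mem, List.mem_append, h, hs, List.erase_of_not_mem h]

theorem pv_getD_mem (d : PySem.Dict String Bool) (k : String) :
    (d.getD k false = true) ↔ k ∈ d.keys.filter (fun k => d.getD k false) := by
  rw [List.mem_filter]
  constructor
  · intro h
    refine ⟨?_, h⟩
    by_cases hc : d.contains k = true
    · exact (PySem.Dict.contains_iff_mem_keys _ _).mp hc
    · have hn : d.get? k = none := by
        rw [PySem.Dict.get?_eq_none_iff_not_mem_keys]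
        exact fun hk => hc ((PySem.Dict.contains_iff_mem_keys _ _).mpr hk)
      rw [PySem.Dict.getD_eq_get?_getD, hn] at h
      exact absurd h (by simp)
  · exact fun h => h.2

-- ===== VERDICT (by name: the statement is the Claim_ definition above) =====
theorem parse_error_values_spec : Claim_equal_parse_error_values := by
  intro flags _
  unfold Spec_parse_error_values parse_error_values parse_error_values_alt
  simp only []
  set d := PySem.Dict.ofList flags with hd
  have hnd : d.keys.Nodup := PySem.Dict.nodup_keys_ofList flags
  set ev0 := d.keys.filter (fun k => d.getD k false) with hev0
  have hfold : d.keys.foldl (fun acc k => if d.getD k false then acc ++ [k] else acc) []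
      = ev0 := by
    rw [PySem.List.foldl_append_if_eq_filter, List.nil_append]
  have hnd0 : ev0.Nodup := hnd.filter _
  have hmem : ∀ k, (d.getD k false = true) ↔ k ∈ ev0 := fun k => pv_getD_mem d k
  -- A's side: four steps
  rw [hfold]
  rw [pv_step "t" "true positives" ev0 [] ev0 (by simp) (by simp)]
  rw [pv_step "f" "false positives" (ev0.erase "t")
        ([] ++ (if "t" ∈ ev0 then ["true positives"] else [])) _
        (by split <;> simp) rfl]
  rw [pv_step "n" "false negatives" ((ev0.erase "t").erase "f")
        (([] ++ (if "t" ∈ ev0 then ["true positives"] else [])) ++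
          (if "f" ∈ ev0.erase "t" then ["false positives"] else [])) _
        (by split <;> split <;> simp) rfl]
  rw [pv_step "s" "summarize" (((ev0.erase "t").erase "f").erase "n")
        ((([] ++ (if "t" ∈ ev0 then ["true positives"] else [])) ++
          (if "f" ∈ ev0.erase "t" then ["false positives"] else [])) ++
          (if "n" ∈ (ev0.erase "t").erase "f" then ["false negatives"] else [])) _
        (by split <;> split <;> split <;> simp) rfl]
  rw [pv_erase4 ev0 hnd0]
  -- B's side
  rw [PySem.Dict.items_eq_map_keys d hnd false, pvSpecial_items]
  rw [List.filter_map, List.map_map]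
  simp only [List.foldl_cons, List.foldl_nil, Function.comp_def]
  -- normalise memberships in erased lists back to ev0, and B's getD tests to memberships
  simp only [List.mem_erase_of_ne (by decide : ("f" : String) ≠ "t"),
    List.mem_erase_of_ne (by decide : ("n" : String) ≠ "t"),
    List.mem_erase_of_ne (by decide : ("n" : String) ≠ "f"),
    List.mem_erase_of_ne (by decide : ("s" : String) ≠ "t"),
    List.mem_erase_of_ne (by decide : ("s" : String) ≠ "f"),
    List.mem_erase_of_ne (by decide : ("s" : String) ≠ "n"),
    hmem]
  have hm : (d.keys.filter fun k => d.getD k false && !pvSpecial.contains k)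
      = ev0.filter (fun k => !(pvSpecial.contains k)) := by
    rw [hev0, List.filter_filter]
    exact List.filter_congr fun a _ => by rw [Bool.and_comm]
  by_cases ht : "t" ∈ ev0 <;> by_cases hf : "f" ∈ ev0 <;> by_cases hn : "n" ∈ ev0 <;>
    by_cases hs : "s" ∈ ev0 <;>
    simp [ht, hf, hn, hs, hm]
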